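-- pv_equiv track=rewrite | github.com/yyyzl/HotWordsLex | src/hotwords_lex/filter.py | compute_frequency_distribution
-- ===== SOURCE A (Python) =====
-- def compute_frequency_distribution(freq_table: dict[str, dict]) -> dict[str, int]:
--     """计算频次分布"""
--     dist: dict[int, int] = {}
--     for entry in freq_table.values():
--         f = entry["frequency"]
--         dist[f] = dist.get(f, 0) + 1
--     result = {}
--     for freq in sorted(dist.keys()):
--         result[f"{freq}次"] = dist[freq]
--     return result
-- ===== SOURCE B (Python) =====
-- def compute_frequency_distribution(freq_table: dict[str, dict]) -> dict[str, int]: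
--     """计算频次分布: sort all frequency values once, then emit one entry per run of equal values."""
--     freqs = sorted(entry["frequency"] for entry in freq_table.values())
--     result = {}
--     prev = None
--     run = 0
--     for f in freqs:
--         if run > 0 and f == prev:
--             run += 1
--         else:
--             if run > 0:
--                 result[f"{prev}次"] = run
--             prev = f
--             run = 1
--     if run > 0:
--         result[f"{prev}次"] = run
--     return result
-- ===== Notes on version B (the rewrite author's own statement) =====
-- stated objective: alternative
-- what changed: B sorts the full list of frequency values once and emits one output entry per consecutive run of equal values in a single pass, instead of A's counting into a hash dict and then sorting the distinct keys.
import Mathlib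
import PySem

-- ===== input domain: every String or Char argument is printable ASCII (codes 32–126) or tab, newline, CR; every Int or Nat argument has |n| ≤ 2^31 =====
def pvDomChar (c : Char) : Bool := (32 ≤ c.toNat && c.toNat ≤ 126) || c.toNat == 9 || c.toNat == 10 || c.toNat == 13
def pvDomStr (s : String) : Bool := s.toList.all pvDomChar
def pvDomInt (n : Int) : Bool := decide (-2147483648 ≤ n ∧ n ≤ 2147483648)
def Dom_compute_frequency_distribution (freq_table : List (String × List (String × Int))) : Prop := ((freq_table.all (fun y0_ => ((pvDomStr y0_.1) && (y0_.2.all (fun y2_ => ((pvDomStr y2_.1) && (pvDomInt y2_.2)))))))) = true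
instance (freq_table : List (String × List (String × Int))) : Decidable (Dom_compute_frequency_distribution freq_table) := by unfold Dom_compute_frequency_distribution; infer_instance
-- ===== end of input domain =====

-- B sorts the n frequency values once and emits one output entry per run of equal values in a single
-- pass (group-runs), instead of A's count-into-a-hash-dict-then-sort-the-distinct-keys; same return
-- value, alternative algorithm (no speed claim).

-- the f-string f"{freq}次", shared by both Pythons
def pvKey (f : Int) : String := PySem.Int.toStr f ++ "次"

-- ===== PORT A =====
def compute_frequency_distribution (freq_table : List (String × List (String × Int))) : List (String × Int) :=
  -- dist: dict[int,int]; for entry in freq_table.values(): f = entry["frequency"]; dist[f] = dist.get(f,0)+1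
  let dist : PySem.Dict Int Int :=
    (PySem.Dict.ofList freq_table).values.foldl
      (fun d entry =>
        let f := ((PySem.Dict.ofList entry).get? "frequency").getD 0  -- Pre_ guarantees the key is present
        d.insert f (d.getD f 0 + 1))
      PySem.Dict.empty
  -- result = {}; for freq in sorted(dist.keys()): result[f"{freq}次"] = dist[freq]
  let result : PySem.Dict String Int :=
    (PySem.List.sorted dist.keys (fun x => x)).foldl
      (fun r freq => r.insert (pvKey freq) (dist.getD freq 0))
      PySem.Dict.empty
  result.items

-- ===== PORT B =====
-- one step of B's run-grouping loop; state = (result, prev, run)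
def pvStep (st : PySem.Dict String Int × Int × Int) (f : Int) : PySem.Dict String Int × Int × Int :=
  if 0 < st.2.2 ∧ f = st.2.1 then (st.1, st.2.1, st.2.2 + 1)
  else ((if 0 < st.2.2 then st.1.insert (pvKey st.2.1) st.2.2 else st.1), f, 1)

-- the trailing "if run > 0: result[f'{prev}次'] = run"
def pvFlush (st : PySem.Dict String Int × Int × Int) : PySem.Dict String Int :=
  if 0 < st.2.2 then st.1.insert (pvKey st.2.1) st.2.2 else st.1

def compute_frequency_distribution_alt (freq_table : List (String × List (String × Int))) : List (String × Int) :=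
  -- freqs = sorted(entry["frequency"] for entry in freq_table.values())
  let freqs := PySem.List.sorted
    ((PySem.Dict.ofList freq_table).values.map
      (fun entry => ((PySem.Dict.ofList entry).get? "frequency").getD 0))  -- Pre_ guarantees the key is present
    (fun x => x)
  (pvFlush (freqs.foldl pvStep (PySem.Dict.empty, 0, 0))).items

-- ===== PRECONDITION & SPEC =====
-- Pre_ excludes exactly the tables in which some entry (a value of the dict) lacks the key
-- "frequency": there both Pythons raise KeyError.
def Pre_compute_frequency_distribution (freq_table : List (String × List (String × Int))) : Prop :=
  ∀ entry ∈ (PySem.Dict.ofList freq_table).values,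
    ((PySem.Dict.ofList entry).get? "frequency").isSome = true
instance (freq_table : List (String × List (String × Int))) : Decidable (Pre_compute_frequency_distribution freq_table) := by unfold Pre_compute_frequency_distribution; infer_instance

def pvWitness_compute_frequency_distribution : (List (String × List (String × Int))) :=
  [("apple", [("frequency", 2)]), ("pear", [("frequency", 1)]), ("plum", [("frequency", 2)])]

def Spec_compute_frequency_distribution (freq_table : List (String × List (String × Int))) (out : List (String × Int)) : Prop := out = compute_frequency_distribution_alt freq_table
instance (freq_table : List (String × List (String × Int))) (out : List (String × Int)) : Decidable (Spec_compute_frequency_distribution freq_table out) := by unfold Spec_compute_frequency_distribution; infer_instance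

-- ===== CLAIM (what is proved, stated in full; the proofs are below) =====
def Claim_equal_compute_frequency_distribution : Prop := ∀ (freq_table : List (String × List (String × Int))), Dom_compute_frequency_distribution freq_table → Pre_compute_frequency_distribution freq_table → Spec_compute_frequency_distribution freq_table (compute_frequency_distribution freq_table)

-- ===== LEMMAS AND PROOFS =====

-- ---- injectivity of pvKey (str(n) is injective) ----

def pvRep (n : Nat) : List Char :=
  if n = 0 then ['0'] else ((Nat.digits 10 n).map Nat.digitChar).reverse

theorem pvToDigitsCore_eq (fuel : Nat) : ∀ (n : Nat) (acc : List Char), n < fuel →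
    Nat.toDigitsCore 10 fuel n acc = pvRep n ++ acc := by
  induction fuel with
  | zero => intro n acc h; omega
  | succ f ih =>
    intro n acc h
    rw [Nat.toDigitsCore]
    by_cases h0 : n / 10 = 0
    · simp only [h0]
      by_cases hn : n = 0
      · subst hn; simp [pvRep]; decide
      · have hlt : n < 10 := by omega
        have : n % 10 = n := Nat.mod_eq_of_lt hlt
        rw [pvRep, if_neg hn, Nat.digits_def' (by norm_num) (Nat.pos_of_ne_zero hn), h0]
        simp [this]
    · simp only [if_neg h0]
      have hn10 : 10 ≤ n := by
        by_contra hc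
        exact h0 (Nat.div_eq_of_lt (by omega))
      have : n / 10 < f := by
        have := Nat.div_lt_self (by omega : 0 < n) (by norm_num : 1 < 10)
        omega
      rw [ih (n / 10) _ this]
      rw [pvRep, if_neg h0]
      conv_rhs => rw [pvRep, if_neg (by omega : ¬ n = 0), Nat.digits_def' (by norm_num) (by omega : 0 < n)]
      simp

theorem pvToDigits_eq (n : Nat) : Nat.toDigits 10 n = pvRep n := by
  rw [Nat.toDigits, pvToDigitsCore_eq (n+1) n [] (by omega)]
  simp

theorem pvRep_no_dash (n : Nat) : ∀ c ∈ pvRep n, c ≠ '-' := by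
  intro c hc
  rw [pvRep] at hc
  by_cases hn : n = 0
  · subst hn; simp at hc; subst hc; decide
  · rw [if_neg hn] at hc
    simp only [List.mem_reverse, List.mem_map] at hc
    obtain ⟨d, hd, rfl⟩ := hc
    have hdlt : d < 10 := Nat.digits_lt_base (by norm_num) hd
    have key : ∀ x : Fin 10, Nat.digitChar x ≠ '-' := by decide
    exact key ⟨d, hdlt⟩

theorem pvMapDC_inj : ∀ (l1 l2 : List Nat), (∀ x ∈ l1, x < 10) → (∀ x ∈ l2, x < 10) →
    l1.map Nat.digitChar = l2.map Nat.digitChar → l1 = l2 := by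
  intro l1
  induction l1 with
  | nil => intro l2 _ _ h; cases l2 <;> simp_all
  | cons a t ih =>
    intro l2 h1 h2 h
    cases l2 with
    | nil => simp at h
    | cons b t2 =>
      simp only [List.map_cons, List.cons.injEq] at h
      have ha := h1 a (by simp)
      have hb := h2 b (by simp)
      have key : ∀ x y : Fin 10, Nat.digitChar x = Nat.digitChar y → x = y := by decide
      have hab : a = b := congrArg Fin.val (key ⟨a, ha⟩ ⟨b, hb⟩ h.1)
      rw [hab, ih t2 (fun x hx => h1 x (by simp [hx])) (fun x hx => h2 x (by simp [hx])) h.2]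

theorem pvRep_inj {a b : Nat} (h : pvRep a = pvRep b) : a = b := by
  by_cases ha : a = 0 <;> by_cases hb : b = 0
  · omega
  · exfalso
    rw [pvRep, if_pos ha, pvRep, if_neg hb] at h
    have : (Nat.digits 10 b).map Nat.digitChar = ['0'] := by
      have := congrArg List.reverse h
      simpa using this.symm
    have hd : Nat.digits 10 b = [0] := by
      apply pvMapDC_inj _ [0] (fun x hx => Nat.digits_lt_base (by norm_num) hx) (by simp)
      simpa using this
    have := Nat.ofDigits_digits 10 b
    rw [hd] at this
    simp [Nat.ofDigits] at this
    omega
  · exfalso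
    rw [pvRep, if_neg ha, pvRep, if_pos hb] at h
    have : (Nat.digits 10 a).map Nat.digitChar = ['0'] := by
      have := congrArg List.reverse h
      simpa using this
    have hd : Nat.digits 10 a = [0] := by
      apply pvMapDC_inj _ [0] (fun x hx => Nat.digits_lt_base (by norm_num) hx) (by simp)
      simpa using this
    have := Nat.ofDigits_digits 10 a
    rw [hd] at this
    simp [Nat.ofDigits] at this
    omega
  · rw [pvRep, if_neg ha, pvRep, if_neg hb] at h
    have h' : (Nat.digits 10 a).map Nat.digitChar = (Nat.digits 10 b).map Nat.digitChar := by
      have := congrArg List.reverse h; simpa using this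
    have hd := pvMapDC_inj _ _ (fun x hx => Nat.digits_lt_base (by norm_num) hx)
      (fun x hx => Nat.digits_lt_base (by norm_num) hx) h'
    have h1 := Nat.ofDigits_digits 10 a
    have h2 := Nat.ofDigits_digits 10 b
    rw [hd] at h1
    rw [h2] at h1
    omega

theorem pvToChars_inj {a b : Int} (h : PySem.Int.toChars a = PySem.Int.toChars b) : a = b := by
  rw [PySem.Int.toChars, PySem.Int.toChars] at h
  by_cases ha : a < 0 <;> by_cases hb : b < 0
  · rw [if_pos ha, if_pos hb] at h
    simp only [List.cons.injEq, pvToDigits_eq] at h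
    have := pvRep_inj h.2
    omega
  · exfalso
    rw [if_pos ha, if_neg hb] at h
    have : '-' ∈ pvRep b.toNat := by rw [← pvToDigits_eq, ← h]; simp
    exact pvRep_no_dash _ _ this rfl
  · exfalso
    rw [if_neg ha, if_pos hb] at h
    have : '-' ∈ pvRep a.toNat := by rw [← pvToDigits_eq, h]; simp
    exact pvRep_no_dash _ _ this rfl
  · rw [if_neg ha, if_neg hb, pvToDigits_eq, pvToDigits_eq] at h
    have := pvRep_inj h
    omega

theorem pvKey_inj : Function.Injective pvKey := by
  intro a b h
  have h' : (pvKey a).toList = (pvKey b).toList := by rw [h]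
  rw [pvKey, pvKey, String.toList_append, String.toList_append,
    PySem.Int.toList_toStr, PySem.Int.toList_toStr] at h'
  exact pvToChars_inj (List.append_inj_left' h' rfl)


theorem pvOfList_pairwise_lt (M : List Int) (h : M.Pairwise (· ≤ ·)) :
    (PySem.Set.ofList M).Pairwise (· < ·) := by
  induction M with
  | nil => simp [PySem.Set.ofList_nil]
  | cons x xs ih =>
    rcases List.pairwise_cons.1 h with ⟨hx, hxs⟩
    rw [PySem.Set.ofList_cons]
    constructor
    · intro y hy
      rw [PySem.Set.discard] at hy
      have hmem := List.mem_filter.1 hy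
      have hyx : y ≠ x := by simpa using hmem.2
      have := hx y ((PySem.Set.mem_ofList _ _).1 hmem.1)
      omega
    · exact (ih hxs).filter _

theorem pvLoop_spec (M : List Int) : ∀ (res : PySem.Dict String Int) (p r : Int),
    M.Pairwise (· ≤ ·) → (∀ x ∈ M, p ≤ x) → 0 < r →
    res.contains (pvKey p) = false → (∀ x ∈ M, res.contains (pvKey x) = false) →
    (pvFlush (M.foldl pvStep (res, p, r))).items
      = res.items ++ (pvKey p, r + (M.count p : Int)) ::
          ((PySem.Set.ofList M).filter (fun g => !(g == p))).map
            (fun g => (pvKey g, (M.count g : Int))) := by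
  induction M with
  | nil =>
    intro res p r _ _ hr hres _
    simp only [List.foldl_nil, pvFlush, if_pos hr]
    rw [PySem.Dict.items_insert_of_not_contains _ _ hres]
    simp [PySem.Set.ofList_nil]
  | cons f xs ih =>
    intro res p r hpw hge hr hres hresall
    rcases List.pairwise_cons.1 hpw with ⟨hf, hxs⟩
    by_cases hfp : f = p
    · subst hfp
      have hstep : pvStep (res, f, r) f = (res, f, r + 1) := by
        simp [pvStep, hr]
      rw [List.foldl_cons, hstep,
        ih res f (r+1) hxs (fun x hx => hge x (by simp [hx])) (by omega) hres
          (fun x hx => hresall x (by simp [hx]))]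
      have hset : ((PySem.Set.ofList (f :: xs)).filter (fun g => !(g == f)))
          = (PySem.Set.ofList xs).filter (fun g => !(g == f)) := by
        rw [PySem.Set.ofList_cons, PySem.Set.discard]
        simp [List.filter_filter]
      rw [hset]
      have hmap : List.map (fun g => (pvKey g, ((f :: xs).count g : Int)))
            ((PySem.Set.ofList xs).filter (fun g => !(g == f)))
          = List.map (fun g => (pvKey g, (xs.count g : Int)))
            ((PySem.Set.ofList xs).filter (fun g => !(g == f))) := by
        apply List.map_congr_left
        intro g hg
        have hgf : f ≠ g := fun h => absurd h.symm (by simpa using (List.mem_filter.1 hg).2)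
        rw [List.count_cons_of_ne hgf]
      rw [hmap]
      have hhead : r + ((f :: xs).count f : Int) = (r + 1) + (xs.count f : Int) := by
        rw [List.count_cons_self]; push_cast; ring
      rw [hhead]
    · have hpf : p < f := lt_of_le_of_ne (hge f (by simp)) (fun h => hfp h.symm)
      have hstep : pvStep (res, p, r) f = (res.insert (pvKey p) r, f, 1) := by
        simp [pvStep, hfp, hr]
      have hkeyne : (pvKey f == pvKey p) = false := by
        apply beq_eq_false_iff_ne.2
        intro hk
        exact hfp (pvKey_inj hk)
      have hins_f : (res.insert (pvKey p) r).contains (pvKey f) = false := by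
        rw [PySem.Dict.contains_insert]
        simp [hkeyne, hresall f (by simp)]
      have hins_all : ∀ x ∈ xs, (res.insert (pvKey p) r).contains (pvKey x) = false := by
        intro x hx
        have hxp : p < x := lt_of_lt_of_le hpf (hf x hx)
        have : (pvKey x == pvKey p) = false := by
          apply beq_eq_false_iff_ne.2
          intro hk
          exact absurd (pvKey_inj hk) (by omega)
        rw [PySem.Dict.contains_insert]
        simp [this, hresall x (by simp [hx])]
      rw [List.foldl_cons, hstep, ih _ f 1 hxs hf (by omega) hins_f hins_all,
        PySem.Dict.items_insert_of_not_contains _ _ hres]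
      have hpnot : p ∉ (f :: xs) := by
        intro hmem
        rcases List.mem_cons.1 hmem with h | h
        · exact hfp h.symm
        · exact absurd (hf p h) (by omega)
      have hpcount : (f :: xs).count p = 0 := List.count_eq_zero.2 hpnot
      have hset : (PySem.Set.ofList (f :: xs)).filter (fun g => !(g == p))
          = f :: (PySem.Set.ofList xs).filter (fun g => !(g == f)) := by
        rw [PySem.Set.ofList_cons, PySem.Set.discard, List.filter_cons]
        rw [if_pos (by simpa using hfp)]
        congr 1
        rw [List.filter_filter]
        apply List.filter_congr
        intro x hx
        have hxmem : x ∈ xs := (PySem.Set.mem_ofList _ _).1 hx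
        have hxp : x ≠ p := by
          have := lt_of_lt_of_le hpf (hf x hxmem); omega
        simp [hxp]
      rw [hset, hpcount]
      have hmap : List.map (fun g => (pvKey g, ((f :: xs).count g : Int)))
            ((PySem.Set.ofList xs).filter (fun g => !(g == f)))
          = List.map (fun g => (pvKey g, (xs.count g : Int)))
            ((PySem.Set.ofList xs).filter (fun g => !(g == f))) := by
        apply List.map_congr_left
        intro g hg
        have hgf : f ≠ g := fun h => absurd h.symm (by simpa using (List.mem_filter.1 hg).2)
        rw [List.count_cons_of_ne hgf]
      have hhead : ((f :: xs).count f : Int) = 1 + (xs.count f : Int) := by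
        rw [List.count_cons_self]; push_cast; ring
      rw [List.map_cons, hmap, hhead]
      simp

theorem pvCounter_foldl {α : Type} (V : List α) (F : α → Int) :
    V.foldl (fun d e => d.insert (F e) (d.getD (F e) 0 + 1)) PySem.Dict.empty
      = PySem.Dict.counter (V.map F) := by
  rw [← PySem.Dict.foldl_insert_getD_add_one_eq_counter, List.foldl_map]

theorem pvA_eq (freq_table : List (String × List (String × Int))) :
    compute_frequency_distribution freq_table
      = (PySem.List.sorted (PySem.Set.ofList
            ((PySem.Dict.ofList freq_table).values.map
              (fun entry => ((PySem.Dict.ofList entry).get? "frequency").getD 0))) (fun x => x)).map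
          (fun f => (pvKey f, (((PySem.Dict.ofList freq_table).values.map
              (fun entry => ((PySem.Dict.ofList entry).get? "frequency").getD 0)).count f : Int))) := by
  simp only [compute_frequency_distribution]
  rw [pvCounter_foldl]
  set L := (PySem.Dict.ofList freq_table).values.map
      (fun entry => ((PySem.Dict.ofList entry).get? "frequency").getD 0) with hL
  rw [PySem.Dict.keys_counter]
  have hpw := PySem.List.sorted_ofList_pairwise_lt (κ := Int) L
  have hnd : (PySem.List.sorted (PySem.Set.ofList L) (fun x => x)).Nodup :=
    hpw.imp (fun h => ne_of_lt h)
  rw [PySem.Dict.items_foldl_insert_fresh _ pvKey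
      (fun freq => (PySem.Dict.counter L).getD freq 0) _
      (fun a _ => PySem.Dict.contains_empty _) (hnd.map pvKey_inj)]
  simp only [PySem.Dict.getD_counter]
  show ([] : List (String × Int)) ++ _ = _
  rw [List.nil_append]

theorem pvB_eq (freq_table : List (String × List (String × Int))) :
    compute_frequency_distribution_alt freq_table
      = (PySem.List.sorted (PySem.Set.ofList
            ((PySem.Dict.ofList freq_table).values.map
              (fun entry => ((PySem.Dict.ofList entry).get? "frequency").getD 0))) (fun x => x)).map
          (fun f => (pvKey f, (((PySem.Dict.ofList freq_table).values.map
              (fun entry => ((PySem.Dict.ofList entry).get? "frequency").getD 0)).count f : Int))) := by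
  simp only [compute_frequency_distribution_alt]
  set L := (PySem.Dict.ofList freq_table).values.map
      (fun entry => ((PySem.Dict.ofList entry).get? "frequency").getD 0) with hL
  have hpwM : (PySem.List.sorted L (fun x => x)).Pairwise (· ≤ ·) :=
    PySem.List.sorted_pairwise L (fun x => x)
  have hperm : (PySem.List.sorted L (fun x => x)).Perm L := PySem.List.sorted_perm L _ _
  have hS : PySem.List.sorted (PySem.Set.ofList L) (fun x => x)
      = PySem.Set.ofList (PySem.List.sorted L (fun x => x)) := by
    apply PySem.List.sorted_eq_of_perm_of_pairwise_lt
    · exact (List.perm_ext_iff_of_nodup (PySem.Set.nodup_ofList _) (PySem.Set.nodup_ofList _)).2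
        (fun a => by
          rw [PySem.Set.mem_ofList, PySem.Set.mem_ofList]
          exact ⟨fun h => hperm.subset h, fun h => hperm.symm.subset h⟩)
    · exact pvOfList_pairwise_lt _ hpwM
  rw [hS]
  cases hM : PySem.List.sorted L (fun x => x) with
  | nil =>
    simp [pvFlush, PySem.Set.ofList_nil, PySem.Dict.empty]
  | cons m rest =>
    rw [hM] at hpwM hperm
    rcases List.pairwise_cons.1 hpwM with ⟨hm, hrest⟩
    have hstep : pvStep (PySem.Dict.empty, 0, 0) m = (PySem.Dict.empty, m, 1) := by
      simp [pvStep]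
    rw [List.foldl_cons, hstep,
      pvLoop_spec rest PySem.Dict.empty m 1 hrest hm (by omega)
        (PySem.Dict.contains_empty _) (fun x _ => PySem.Dict.contains_empty _)]
    rw [PySem.Set.ofList_cons, PySem.Set.discard, List.map_cons]
    have hcnt : ∀ g : Int, L.count g = (m :: rest).count g := fun g => (hperm.count_eq g).symm
    have hhead : 1 + (rest.count m : Int) = (L.count m : Int) := by
      rw [hcnt m, List.count_cons_self]; push_cast; ring
    have hmap : List.map (fun g => (pvKey g, (rest.count g : Int)))
          ((PySem.Set.ofList rest).filter (fun g => !(g == m)))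
        = List.map (fun g => (pvKey g, (L.count g : Int)))
          ((PySem.Set.ofList rest).filter (fun g => !(g == m))) := by
      apply List.map_congr_left
      intro g hg
      have hgm : m ≠ g := fun h => absurd h.symm (by simpa using (List.mem_filter.1 hg).2)
      rw [hcnt g, List.count_cons_of_ne hgm]
    have hempty : (PySem.Dict.empty : PySem.Dict String Int).items = [] := rfl
    rw [hempty, List.nil_append, hhead, hmap]

-- ===== VERDICT (by name: the statement is the Claim_ definition above) =====
theorem compute_frequency_distribution_spec : Claim_equal_compute_frequency_distribution := by
  intro ft _ _
  unfold Spec_compute_frequency_distribution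
  rw [pvA_eq, pvB_eq]
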